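-- pv_equiv track=rewrite | github.com/Weijie-Yang/DV-LAE | utils.py | split_list_by_values
-- ===== SOURCE A (Python) =====
-- from typing import List, Optional
--
-- def split_list_by_values(data_list: List[int], split_points: List[int]) -> List[List[int]]:
--     """
--     Splits a list of numbers into sublists based on specified split points.
--     Numbers less than or equal to a split point go into the corresponding list.
--
--     Example: split_list_by_values([1, 5, 2, 8, 10, 3], [3, 8])
--              -> [[1, 2, 3], [5, 8], [10]]
--
--     Args:
--         data_list (List[int]): The list of numbers to split.
--         split_points (List[int]): A sorted list of values to split at.
--
--     Returns:
--         List[List[int]]: A list of sublists.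
--     """
--     if not data_list:
--         return []
--     if not split_points:
--         return [data_list] # Return the original list as a single sublist
--
--     sorted_split_points = sorted(split_points)
--     result = []
--     remaining_items = sorted(data_list) # Sort data for easier processing
--     current_sublist = []
--
--     split_idx = 0
--     current_split_value = sorted_split_points[split_idx]
--
--     for item in remaining_items:
--         # If item exceeds current split point, finalize the current sublist
--         # and move to the next split point if available
--         while item > current_split_value:
--              result.append(current_sublist)
--              current_sublist = []
--              split_idx += 1
--              if split_idx < len(sorted_split_points):
--                  current_split_value = sorted_split_points[split_idx]
--              else:
--                   # This item belongs to the last sublist (greater than all split points)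
--                   # Set split_value effectively to infinity
--                   current_split_value = float('inf')
--                   # Break the inner while loop, the item will be added below
--
--         # Add item to the correct sublist (it's <= current_split_value)
--         current_sublist.append(item)
--
--     # Add the last collected sublist
--     result.append(current_sublist)
--
--     # If there were more split points than data segments, add empty lists
--     while len(result) < len(sorted_split_points) + 1:
--          result.append([])
--
--     # Original code had slightly different logic, potentially removing items.
--     # This version ensures all items are placed into buckets defined by split points.
--     # Re-check the original 'split_list' function's exact behavior if critical.
--     # The original seemed to modify the list in place which is generally avoided.
--
--     return result
-- ===== SOURCE B (Python) =====
-- def split_list_by_values(data_list, split_points):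
--     if not data_list:
--         return []
--     if not split_points:
--         return [data_list]  # original list object, unsorted
--     sorted_data = sorted(data_list)
--     n = len(sorted_data)
--     result = []
--     prev = 0
--     for sp in sorted(split_points):
--         # hand-written bisect_right of sp in sorted_data, restricted to [prev, n)
--         lo, hi = prev, n
--         while lo < hi:
--             mid = (lo + hi) // 2
--             if sorted_data[mid] <= sp:
--                 lo = mid + 1
--             else:
--                 hi = mid
--         result.append(sorted_data[prev:lo])
--         prev = lo
--     result.append(sorted_data[prev:])
--     return result
-- ===== Notes on version B (the rewrite author's own statement) =====
-- stated objective: alternative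
-- what changed: A scans the sorted data item by item with an inner while-loop advancing a split index and an inf sentinel, then pads with empty buckets; B instead walks the sorted split points, locating each bucket boundary by a hand-written binary search (bisect_right restricted to [prev, n)) and emitting slices of the sorted data, so buckets arise from boundary indices rather than from an accumulating element scan.
import Mathlib
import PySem

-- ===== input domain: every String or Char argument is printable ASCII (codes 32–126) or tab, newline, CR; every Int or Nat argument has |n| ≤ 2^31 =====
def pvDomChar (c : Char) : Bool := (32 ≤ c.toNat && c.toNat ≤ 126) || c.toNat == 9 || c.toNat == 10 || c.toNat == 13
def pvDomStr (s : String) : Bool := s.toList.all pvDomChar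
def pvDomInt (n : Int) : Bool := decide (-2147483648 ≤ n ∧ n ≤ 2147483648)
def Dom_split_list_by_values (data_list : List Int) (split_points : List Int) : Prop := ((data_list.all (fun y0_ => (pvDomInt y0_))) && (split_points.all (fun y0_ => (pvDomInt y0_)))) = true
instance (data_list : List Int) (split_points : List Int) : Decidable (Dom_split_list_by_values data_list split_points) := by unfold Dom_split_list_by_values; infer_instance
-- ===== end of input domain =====

-- B replaces A's per-item scan with binary-search boundaries and slicing (same results, different traversal).

-- ===== PORT A =====
-- A's inner 'while item > current_split_value' loop.  Python's float('inf') sentinel is used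
-- only as "a value every int is ≤"; it is modelled by Option Int with none = +infinity.
def pyWhileA (ssp : List Int) (item : Int) (res : List (List Int)) (cur : List Int)
    (idx : Nat) (csv : Option Int) : List (List Int) × List Int × Nat × Option Int :=
  match csv with
  | none => (res, cur, idx, none)          -- item > inf is False: the while loop does not run
  | some v =>
    if v < item then                        -- item > current_split_value
      let res' := res ++ [cur]
      let idx' := idx + 1
      if _h : idx' < ssp.length then
        pyWhileA ssp item res' [] idx' (some (ssp.getD idx' 0))   -- ssp[idx'] (in range, getD exact)
      else
        (res', [], idx', none)              -- csv := inf; item > inf is False so the while exits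
    else (res, cur, idx, some v)
termination_by ssp.length - idx
decreasing_by omega

-- A's trailing 'while len(result) < len(sorted_split_points) + 1: result.append([])'
def pyPad (n : Nat) (res : List (List Int)) : List (List Int) :=
  if res.length < n then pyPad n (res ++ [[]]) else res
termination_by n - res.length
decreasing_by simp; omega

def split_list_by_values (data_list : List Int) (split_points : List Int) : List (List Int) :=
  if data_list = [] then []
  else if split_points = [] then [data_list]
  else
    let ssp := PySem.List.sorted split_points (fun x => x) false
    let remaining := PySem.List.sorted data_list (fun x => x) false
    -- current_split_value = sorted_split_points[0]: ssp ≠ [] here, so getD is exact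
    let st := remaining.foldl
      (fun (s : List (List Int) × List Int × Nat × Option Int) item =>
        let s' := pyWhileA ssp item s.1 s.2.1 s.2.2.1 s.2.2.2
        (s'.1, s'.2.1 ++ [item], s'.2.2.1, s'.2.2.2))
      ([], [], 0, some (ssp.getD 0 0))
    pyPad (ssp.length + 1) (st.1 ++ [st.2.1])

-- ===== PORT B =====
-- Source B's hand-written bisect_right loop 'while lo < hi: ...' restricted to [prev, n).
-- mid is always < hi ≤ length, so getD is exact for sorted_data[mid].
def bLoop (sd : List Int) (sp : Int) (lo hi : Nat) : Nat :=
  if _h : lo < hi then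
    let mid := (lo + hi) / 2
    if sd.getD mid 0 ≤ sp then bLoop sd sp (mid + 1) hi else bLoop sd sp lo mid
  else lo
termination_by hi - lo
decreasing_by all_goals omega

def split_list_by_values_alt (data_list : List Int) (split_points : List Int) : List (List Int) :=
  if data_list = [] then []
  else if split_points = [] then [data_list]
  else
    let sd := PySem.List.sorted data_list (fun x => x) false
    let n := sd.length
    let st := (PySem.List.sorted split_points (fun x => x) false).foldl
      (fun (s : List (List Int) × Nat) sp =>
        let lo := bLoop sd sp s.2 n
        (s.1 ++ [PySem.List.slice sd (some (s.2 : Int)) (some (lo : Int))], lo))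
      ([], 0)
    st.1 ++ [PySem.List.slice sd (some (st.2 : Int)) none]

-- ===== PRECONDITION & SPEC =====
def Spec_split_list_by_values (data_list : List Int) (split_points : List Int) (out : List (List Int)) : Prop := out = split_list_by_values_alt data_list split_points
instance (data_list : List Int) (split_points : List Int) (out : List (List Int)) : Decidable (Spec_split_list_by_values data_list split_points out) := by unfold Spec_split_list_by_values; infer_instance

-- ===== CLAIM (what is proved, stated in full; the proofs are below) =====
def Claim_equal_split_list_by_values : Prop := ∀ (data_list : List Int) (split_points : List Int), Dom_split_list_by_values data_list split_points → Spec_split_list_by_values data_list split_points (split_list_by_values data_list split_points)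

-- ===== LEMMAS AND PROOFS =====

-- Common specification: bucket the (already sorted) data by the (already sorted) split points.
def buckets (cur : List Int) : List Int → List Int → List (List Int)
  | [], sd => [cur ++ sd]
  | p :: ps, sd =>
      (cur ++ sd.takeWhile (fun x => x ≤ p)) :: buckets [] ps (sd.dropWhile (fun x => x ≤ p))

lemma buckets_nil_data (ps : List Int) : buckets [] ps [] = List.replicate ps.length [] ++ [[]] := by
  induction ps with
  | nil => simp [buckets]
  | cons p ps ih => simp [buckets, ih, List.replicate_succ]

-- ---- A side ----

-- abstract form of A's while loop: the state (idx, csv) is the remaining suffix of ssp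
def whileAbs (item : Int) (res : List (List Int)) (cur : List Int) :
    List Int → List (List Int) × List Int × List Int
  | [] => (res, cur, [])
  | v :: rest => if v < item then whileAbs item (res ++ [cur]) [] rest else (res, cur, v :: rest)

def stepAbs (s : List (List Int) × List Int × List Int) (item : Int) :
    List (List Int) × List Int × List Int :=
  let t := whileAbs item s.1 s.2.1 s.2.2
  (t.1, t.2.1 ++ [item], t.2.2)

-- one-step unfoldings of the port's while loop
lemma pyWhileA_none (ssp : List Int) (item : Int) (res : List (List Int)) (cur : List Int)
    (idx : Nat) : pyWhileA ssp item res cur idx none = (res, cur, idx, none) := by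
  rw [pyWhileA]

lemma pyWhileA_some (ssp : List Int) (item : Int) (res : List (List Int)) (cur : List Int)
    (idx : Nat) (v : Int) :
    pyWhileA ssp item res cur idx (some v) =
      if v < item then
        (if idx + 1 < ssp.length then
          pyWhileA ssp item (res ++ [cur]) [] (idx + 1) (some (ssp.getD (idx + 1) 0))
        else (res ++ [cur], [], idx + 1, none))
      else (res, cur, idx, some v) := by
  rw [pyWhileA]
  by_cases hv : v < item
  · simp only [hv, if_pos]
    by_cases hlt : idx + 1 < ssp.length <;> simp [hlt]
  · simp [hv]

-- the suffix component of whileAbs's result is again a tail of ssp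
lemma whileAbs_suffix (ssp : List Int) (item : Int) :
    ∀ (suf : List Int) (res : List (List Int)) (cur : List Int) (j : Nat),
      j ≤ ssp.length → suf = ssp.drop j →
      ∃ j', j ≤ j' ∧ j' ≤ ssp.length ∧ (whileAbs item res cur suf).2.2 = ssp.drop j' := by
  intro suf
  induction suf with
  | nil =>
    intro res cur j hj _
    exact ⟨ssp.length, hj, le_refl _, by simp [whileAbs]⟩
  | cons v rest ih =>
    intro res cur j hj hsuf
    have hjlt : j < ssp.length := by
      by_contra h
      rw [List.drop_eq_nil_of_le (Nat.le_of_not_lt h)] at hsuf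
      simp at hsuf
    have hrest : rest = ssp.drop (j + 1) := by
      have := congrArg List.tail hsuf
      simpa [List.tail_drop] using this
    by_cases hv : v < item
    · obtain ⟨j', h1, h2, h3⟩ := ih (res ++ [cur]) [] (j + 1) hjlt hrest
      exact ⟨j', by omega, h2, by simpa [whileAbs, hv] using h3⟩
    · exact ⟨j, le_refl _, hj, by simp [whileAbs, hv, hsuf]⟩

lemma pyWhileA_eq_abs (ssp : List Int) (item : Int) :
    ∀ (k : Nat) (res : List (List Int)) (cur : List Int) (idx : Nat),
      idx ≤ ssp.length → ssp.length - idx ≤ k →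
      pyWhileA ssp item res cur idx ((ssp.drop idx).head?) =
        ((whileAbs item res cur (ssp.drop idx)).1,
         (whileAbs item res cur (ssp.drop idx)).2.1,
         ssp.length - (whileAbs item res cur (ssp.drop idx)).2.2.length,
         (whileAbs item res cur (ssp.drop idx)).2.2.head?) := by
  intro k
  induction k with
  | zero =>
    intro res cur idx h1 h2
    have : idx = ssp.length := by omega
    subst this
    simp [whileAbs, pyWhileA_none]
  | succ k ih =>
    intro res cur idx h1 _h2
    rcases hd : ssp.drop idx with _ | ⟨v, rest⟩
    · have : idx = ssp.length := by
        have := List.drop_eq_nil_iff.mp hd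
        omega
      subst this
      simp [whileAbs, pyWhileA_none]
    · have hidx : idx < ssp.length := by
        by_contra h
        simp [List.drop_eq_nil_of_le (Nat.le_of_not_lt h)] at hd
      have hrest : rest = ssp.drop (idx + 1) := by
        have := congrArg List.tail hd
        simpa [List.tail_drop] using this.symm
      have hlenvr : rest.length + 1 = ssp.length - idx := by
        have := congrArg List.length hd
        simp at this
        omega
      simp only [List.head?_cons]
      rw [pyWhileA_some]
      by_cases hv : v < item
      · simp only [hv, if_pos]
        by_cases hlt : idx + 1 < ssp.length
        · simp only [hlt, if_pos]
          have hget : some (ssp.getD (idx + 1) 0) = (ssp.drop (idx + 1)).head? := by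
            rw [List.head?_drop, List.getD_eq_getElem?_getD, List.getElem?_eq_getElem hlt]
            rfl
          rw [hget, ih (res ++ [cur]) [] (idx + 1) (by omega) (by omega)]
          simp [whileAbs, hv, hrest]
        · have heq : idx + 1 = ssp.length := by omega
          have hrestnil : rest = [] := by
            rw [hrest, List.drop_eq_nil_iff]
            omega
          simp [whileAbs, hv, hrestnil, heq]
      · simp only [hv, if_false]
        simp only [whileAbs, hv, if_false]
        simp only [List.length_cons, List.head?_cons]
        rw [show ssp.length - (rest.length + 1) = idx from by omega]

-- the port's fold equals the fold of the abstract step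
lemma fold_eq_abs (ssp : List Int) :
    ∀ (sd : List Int) (res : List (List Int)) (cur : List Int) (idx : Nat), idx ≤ ssp.length →
      sd.foldl
        (fun (s : List (List Int) × List Int × Nat × Option Int) item =>
          let s' := pyWhileA ssp item s.1 s.2.1 s.2.2.1 s.2.2.2
          (s'.1, s'.2.1 ++ [item], s'.2.2.1, s'.2.2.2))
        (res, cur, idx, (ssp.drop idx).head?) =
      ((sd.foldl stepAbs (res, cur, ssp.drop idx)).1,
       (sd.foldl stepAbs (res, cur, ssp.drop idx)).2.1,
       ssp.length - (sd.foldl stepAbs (res, cur, ssp.drop idx)).2.2.length,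
       (sd.foldl stepAbs (res, cur, ssp.drop idx)).2.2.head?) := by
  intro sd
  induction sd with
  | nil =>
    intro res cur idx h1
    simp only [List.foldl_nil, List.length_drop]
    rw [show ssp.length - (ssp.length - idx) = idx from by omega]
  | cons x sd ih =>
    intro res cur idx h1
    obtain ⟨idx', hi1, hi2, hi3⟩ := whileAbs_suffix ssp x (ssp.drop idx) res cur idx h1 rfl
    have hw := pyWhileA_eq_abs ssp x (ssp.length - idx) res cur idx h1 (le_refl _)
    simp only [List.foldl_cons]
    rw [show stepAbs (res, cur, ssp.drop idx) x
        = ((whileAbs x res cur (ssp.drop idx)).1,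
           (whileAbs x res cur (ssp.drop idx)).2.1 ++ [x],
           (whileAbs x res cur (ssp.drop idx)).2.2) from by simp [stepAbs]]
    simp only [hw, hi3]
    rw [show ssp.length - (ssp.drop idx').length = idx' from by simp; omega]
    exact ih (whileAbs x res cur (ssp.drop idx)).1
      ((whileAbs x res cur (ssp.drop idx)).2.1 ++ [x]) idx' hi2

-- folding stepAbs over data that is all ≤ the current split point just extends cur
lemma foldAbs_all_le (p : Int) (ps : List Int) :
    ∀ (l : List Int), (∀ x ∈ l, x ≤ p) → ∀ res cur,
      l.foldl stepAbs (res, cur, p :: ps) = (res, cur ++ l, p :: ps) := by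
  intro l
  induction l with
  | nil => intro _ res cur; simp
  | cons x l ih =>
    intro h res cur
    have hx : ¬ p < x := not_lt.mpr (h x (by simp))
    simp only [List.foldl_cons]
    rw [show stepAbs (res, cur, p :: ps) x = (res, cur ++ [x], p :: ps) by
      simp [stepAbs, whileAbs, hx]]
    rw [ih (fun y hy => h y (by simp [hy])) res (cur ++ [x])]
    simp

lemma foldAbs_nil_ps :
    ∀ (sd : List Int) (res cur),
      sd.foldl stepAbs (res, cur, ([] : List Int)) = (res, cur ++ sd, []) := by
  intro sd
  induction sd with
  | nil => intro res cur; simp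
  | cons x sd ih =>
    intro res cur
    simp only [List.foldl_cons]
    rw [show stepAbs (res, cur, ([] : List Int)) x = (res, cur ++ [x], []) by
      simp [stepAbs, whileAbs]]
    rw [ih]
    simp

-- main characterisation of A's fold
lemma foldAbs_buckets :
    ∀ (ps sd cur : List Int) (resl : List (List Int)),
      (let t := sd.foldl stepAbs (resl, cur, ps)
       t.1 ++ [t.2.1] ++ List.replicate t.2.2.length [] = resl ++ buckets cur ps sd
       ∧ t.1.length + t.2.2.length = resl.length + ps.length) := by
  intro ps
  induction ps with
  | nil =>
    intro sd cur resl
    rw [foldAbs_nil_ps]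
    simp [buckets]
  | cons p ps ih =>
    intro sd cur resl
    have hsplit : sd = sd.takeWhile (fun x => x ≤ p) ++ sd.dropWhile (fun x => x ≤ p) := by
      simp
    rcases hdw : sd.dropWhile (fun x => decide (x ≤ p)) with _ | ⟨x, d⟩
    · have h1 : sd.foldl stepAbs (resl, cur, p :: ps)
          = (resl, cur ++ sd.takeWhile (fun x => x ≤ p), p :: ps) := by
        conv_lhs => rw [hsplit]
        simp only [hdw]
        rw [List.foldl_append]
        rw [foldAbs_all_le p ps _ (fun x hx => by
          have h' := List.mem_takeWhile_imp (l := sd) (p := fun y => decide (y ≤ p)) hx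
          simpa using h') resl cur]
        simp
      simp only [h1, buckets, hdw, buckets_nil_data]
      constructor
      · simp [List.replicate_succ']
      · simp
    · have hx : ¬ x ≤ p := by
        have := List.head?_dropWhile_not (p := fun x => decide (x ≤ p)) sd
        rw [hdw] at this
        simpa using this
      have h1 : sd.foldl stepAbs (resl, cur, p :: ps)
          = (x :: d).foldl stepAbs (resl ++ [cur ++ sd.takeWhile (fun x => x ≤ p)], [], ps) := by
        conv_lhs => rw [hsplit]
        simp only [hdw]
        rw [List.foldl_append]
        rw [foldAbs_all_le p ps _ (fun x hx => by
          have h' := List.mem_takeWhile_imp (l := sd) (p := fun y => decide (y ≤ p)) hx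
          simpa using h') resl cur]
        rcases ps with _ | ⟨q, qs⟩
        · simp only [List.foldl_cons]
          rw [show stepAbs (resl, cur ++ sd.takeWhile (fun x => x ≤ p), [p]) x
              = stepAbs (resl ++ [cur ++ sd.takeWhile (fun x => x ≤ p)], [], []) x by
            simp [stepAbs, whileAbs, lt_of_not_ge hx]]
        · simp only [List.foldl_cons]
          rw [show stepAbs (resl, cur ++ sd.takeWhile (fun x => x ≤ p), p :: q :: qs) x
              = stepAbs (resl ++ [cur ++ sd.takeWhile (fun x => x ≤ p)], [], q :: qs) x by
            simp [stepAbs, whileAbs, lt_of_not_ge hx]]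
      have := ih (x :: d) [] (resl ++ [cur ++ sd.takeWhile (fun x => x ≤ p)])
      simp only at this
      rw [h1]
      refine ⟨?_, ?_⟩
      · rw [this.1]
        simp [buckets, hdw]
      · have := this.2
        simp at this ⊢
        omega

-- the padding loop appends exactly the missing empty lists
lemma pyPad_eq (n : Nat) :
    ∀ (k : Nat) (res : List (List Int)), n - res.length ≤ k →
      pyPad n res = res ++ List.replicate (n - res.length) [] := by
  intro k
  induction k with
  | zero =>
    intro res h
    rw [pyPad]
    have : ¬ res.length < n := by omega
    simp [this, show n - res.length = 0 by omega]
  | succ k ih =>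
    intro res h
    rw [pyPad]
    by_cases hl : res.length < n
    · rw [if_pos hl, ih (res ++ [[]]) (by simp; omega)]
      rw [show n - res.length = (n - (res.length + 1)) + 1 from by omega, List.replicate_succ]
      simp
    · simp [hl, show n - res.length = 0 by omega]

-- ---- B side ----

lemma sorted_getD_mono (sd : List Int) (h : sd.Pairwise (· ≤ ·)) :
    ∀ i j, i ≤ j → j < sd.length → sd.getD i 0 ≤ sd.getD j 0 := by
  intro i j hij hj
  rcases Nat.eq_or_lt_of_le hij with rfl | hlt
  · exact le_refl _
  · have hi : i < sd.length := lt_trans hlt hj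
    rw [List.getD_eq_getElem _ _ hi, List.getD_eq_getElem _ _ hj]
    exact List.pairwise_iff_getElem.mp h i j hi hj hlt

lemma bLoop_spec (sd : List Int) (sp : Int) (hs : sd.Pairwise (· ≤ ·)) :
    ∀ (k lo hi : Nat), hi ≤ sd.length → lo ≤ hi → hi - lo ≤ k →
      lo ≤ bLoop sd sp lo hi ∧ bLoop sd sp lo hi ≤ hi ∧
      (∀ i, lo ≤ i → i < bLoop sd sp lo hi → sd.getD i 0 ≤ sp) ∧
      (∀ i, bLoop sd sp lo hi ≤ i → i < hi → ¬ sd.getD i 0 ≤ sp) := by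
  intro k
  induction k with
  | zero =>
    intro lo hi h1 h2 h3
    have heq : lo = hi := by omega
    subst heq
    rw [bLoop, dif_neg (lt_irrefl lo)]
    refine ⟨le_refl _, le_refl _, ?_, ?_⟩ <;> intro i hi1 hi2 <;> exact absurd hi2 (by omega)
  | succ k ih =>
    intro lo hi h1 h2 h3
    rw [bLoop]
    by_cases hlh : lo < hi
    · rw [dif_pos hlh]
      have hmid1 : lo ≤ (lo + hi) / 2 := by omega
      have hmid2 : (lo + hi) / 2 < hi := by omega
      by_cases hsd : sd.getD ((lo + hi) / 2) 0 ≤ sp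
      · simp only [hsd, if_pos]
        obtain ⟨r1, r2, r3, r4⟩ := ih ((lo + hi) / 2 + 1) hi h1 (by omega) (by omega)
        refine ⟨by omega, r2, ?_, r4⟩
        intro i hi1 hi2
        by_cases hile : i ≤ (lo + hi) / 2
        · exact le_trans (sorted_getD_mono sd hs i ((lo + hi) / 2) hile (by omega)) hsd
        · exact r3 i (by omega) hi2
      · simp only [hsd, if_false]
        obtain ⟨r1, r2, r3, r4⟩ := ih lo ((lo + hi) / 2) (by omega) (by omega) (by omega)
        refine ⟨r1, by omega, r3, ?_⟩
        intro i hi1 hi2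
        by_cases hile : i < (lo + hi) / 2
        · exact r4 i hi1 hile
        · intro hcon
          exact hsd (le_trans (sorted_getD_mono sd hs ((lo + hi) / 2) i (by omega) (by omega)) hcon)
    · rw [dif_neg hlh]
      refine ⟨le_refl _, by omega, ?_, ?_⟩ <;> intro i hi1 hi2 <;> exact absurd hi2 (by omega)

-- take/drop at a boundary index is takeWhile/dropWhile
lemma takeWhile_eq_take_of_boundary (sp : Int) :
    ∀ (m : List Int) (k : Nat), k ≤ m.length →
      (∀ j, j < k → m.getD j 0 ≤ sp) →
      (∀ j, k ≤ j → j < m.length → ¬ m.getD j 0 ≤ sp) →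
      m.takeWhile (fun x => x ≤ sp) = m.take k ∧ m.dropWhile (fun x => x ≤ sp) = m.drop k := by
  intro m
  induction m with
  | nil =>
    intro k h1 _ _
    simp at h1
    simp [h1]
  | cons x m ih =>
    intro k h1 h2 h3
    rcases k with _ | k
    · have hx : ¬ x ≤ sp := by
        have := h3 0 (by omega) (by simp)
        simpa using this
      simp [hx]
    · have hx : x ≤ sp := by
        have := h2 0 (by omega)
        simpa using this
      have := ih k (by simpa using h1)
        (fun j hj => by have := h2 (j + 1) (by omega); simpa using this)
        (fun j hj1 hj2 => by have := h3 (j + 1) (by omega) (by simp; omega); simpa using this)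
      simp [hx, this.1, this.2]

lemma foldB_buckets (sd : List Int) (hs : sd.Pairwise (· ≤ ·)) :
    ∀ (ps : List Int), ps.Pairwise (· ≤ ·) →
      ∀ (res : List (List Int)) (prev : Nat), prev ≤ sd.length →
        (∀ p ∈ ps, ∀ i, i < prev → sd.getD i 0 ≤ p) →
        (let t := ps.foldl
            (fun (s : List (List Int) × Nat) sp =>
              let lo := bLoop sd sp s.2 sd.length
              (s.1 ++ [PySem.List.slice sd (some (s.2 : Int)) (some (lo : Int))], lo))
            (res, prev)
         t.1 ++ [PySem.List.slice sd (some (t.2 : Int)) none] = res ++ buckets [] ps (sd.drop prev)) := by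
  intro ps
  induction ps with
  | nil =>
    intro _ res prev hprev _
    simp [buckets, PySem.List.slice_from_natCast]
  | cons p ps ih =>
    intro hps res prev hprev hpre
    have hple : ∀ q ∈ ps, p ≤ q := fun q hq => (List.pairwise_cons.mp hps).1 q hq
    obtain ⟨r1, r2, r3, r4⟩ :=
      bLoop_spec sd p hs (sd.length - prev) prev sd.length (le_refl _) hprev (le_refl _)
    set r := bLoop sd p prev sd.length with hr
    -- boundary facts transported to the dropped list m := sd.drop prev
    have hmlen : (sd.drop prev).length = sd.length - prev := by simp
    have hmget : ∀ j, (sd.drop prev).getD j 0 = sd.getD (prev + j) 0 := by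
      intro j
      simp [List.getD, List.getElem?_drop]
    have hbound := takeWhile_eq_take_of_boundary p (sd.drop prev) (r - prev)
      (by omega)
      (fun j hj => by
        rw [hmget]
        by_cases hc : prev + j < prev
        · omega
        · exact r3 (prev + j) (by omega) (by omega))
      (fun j hj1 hj2 => by
        rw [hmget]
        exact r4 (prev + j) (by omega) (by omega))
    simp only [List.foldl_cons, ← hr]
    have hdd : (sd.drop prev).drop (r - prev) = sd.drop r := by
      rw [List.drop_drop]
      congr 1
      omega
    have := ih (List.Pairwise.sublist (List.sublist_cons_self p ps) hps)
      (res ++ [PySem.List.slice sd (some (prev : Int)) (some (r : Int))]) r r2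
      (fun q hq i hi => by
        by_cases hc : i < prev
        · exact hpre q (by simp [hq]) i hc
        · exact le_trans (r3 i (by omega) hi) (hple q hq))
    simp only at this
    rw [this]
    simp only [buckets]
    rw [show (fun x : Int => decide (x ≤ p)) = (fun x : Int => decide (x ≤ p)) from rfl]
    rw [hbound.1, hbound.2, hdd]
    rw [PySem.List.slice_natCast]
    simp

-- list-shape helpers for the top level
lemma head?_eq_getD {l : List Int} (h : l ≠ []) : l.head? = some (l.getD 0 0) := by
  rcases l with _ | ⟨x, l⟩
  · simp at h
  · simp

theorem split_list_by_values_spec_aux (data_list : List Int) (split_points : List Int) :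
    split_list_by_values data_list split_points = split_list_by_values_alt data_list split_points := by
  by_cases hd : data_list = []
  · simp [split_list_by_values, split_list_by_values_alt, hd]
  · by_cases hsp : split_points = []
    · simp [split_list_by_values, split_list_by_values_alt, hd, hsp]
    · simp only [split_list_by_values, split_list_by_values_alt, hd, hsp, if_false]
      set ssp := PySem.List.sorted split_points (fun x => x) false with hssp
      set sd := PySem.List.sorted data_list (fun x => x) false with hsd
      have hsspne : ssp ≠ [] := by
        rw [hssp]
        simpa [PySem.List.sorted_eq_nil_iff] using hsp
      have hsspsorted : ssp.Pairwise (· ≤ ·) := by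
        simpa using PySem.List.sorted_pairwise split_points (fun x => x)
      have hsdsorted : sd.Pairwise (· ≤ ·) := by
        simpa using PySem.List.sorted_pairwise data_list (fun x => x)
      -- A side: fold to abstract, abstract to buckets, pad to replicate
      have hinit : some (ssp.getD 0 0) = (ssp.drop 0).head? := by
        simp [head?_eq_getD hsspne]
      simp only [hinit]
      rw [fold_eq_abs ssp sd [] [] 0 (by omega)]
      simp only [List.drop_zero]
      have habs := foldAbs_buckets ssp sd [] []
      simp only at habs
      obtain ⟨habs1, habs2⟩ := habs
      set t := sd.foldl stepAbs ([], [], ssp) with ht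
      have hproj : ((t.1, t.2.1, ssp.length - t.2.2.length, t.2.2.head?) :
          List (List Int) × List Int × Nat × Option Int).1
          ++ [((t.1, t.2.1, ssp.length - t.2.2.length, t.2.2.head?) :
          List (List Int) × List Int × Nat × Option Int).2.1] = t.1 ++ [t.2.1] := rfl
      rw [hproj]
      rw [pyPad_eq (ssp.length + 1) (ssp.length + 1) (t.1 ++ [t.2.1]) (by simp; omega)]
      have hlen : ssp.length + 1 - (t.1 ++ [t.2.1]).length = t.2.2.length := by
        simp at habs2 ⊢
        omega
      rw [hlen]
      have hB := foldB_buckets sd hsdsorted ssp hsspsorted [] 0 (by omega) (by simp)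
      simp only at hB
      rw [show sd.drop 0 = sd from List.drop_zero] at hB
      rw [hB, ← habs1]

-- ===== VERDICT (by name: the statement is the Claim_ definition above) =====
theorem split_list_by_values_spec : Claim_equal_split_list_by_values := by
  intro data_list split_points _
  exact split_list_by_values_spec_aux data_list split_points
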